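-- pv_equiv track=rewrite | github.com/prasetiaari/ReconLens | app/routers/sensitive_paths.py | _paginate_iter
-- ===== SOURCE A (Python) =====
-- from typing import Iterable, Tuple, List, Optional, Set
--
-- def _paginate_iter(it: Iterable[str], page: int, page_size: int) -> Tuple[List[str], int, int, bool, bool]:
--     start = max(0, (page - 1) * page_size)
--     end = start + page_size
--
--     rows: List[str] = []
--     total = 0
--     for total, url in enumerate(it, start=1):
--         if start < total <= end:
--             rows.append(url)
--
--     total_pages = max(1, (total + page_size - 1) // page_size)
--     has_prev = page > 1
--     has_next = page < total_pages
--     return rows, total, total_pages, has_prev, has_next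
-- ===== SOURCE B (Python) =====
-- from typing import Iterable, Tuple, List
--
--
-- def _paginate_iter(it: Iterable[str], page: int, page_size: int) -> Tuple[List[str], int, int, bool, bool]:
--     # Materialize once, then pick the page with slice arithmetic instead of a
--     # conditional-append loop.  The window length is clamped to >= 0 so a
--     # nonsensical negative page_size yields an empty page, not a wrapped slice.
--     items = list(it)
--     total = len(items)
--     start = max(0, (page - 1) * page_size)
--     rows = items[start:start + max(0, page_size)]
--     total_pages = max(1, (total + page_size - 1) // page_size)
--     return rows, total, total_pages, page > 1, page < total_pages
-- ===== Notes on version B (the rewrite author's own statement) =====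
-- stated objective: simpler
-- what changed: Replaces A's enumerate loop with a running counter and conditional append by materializing the iterable once, taking total = len(items) and the page rows as a single clamped slice items[start:start+max(0,page_size)].
import Mathlib
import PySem

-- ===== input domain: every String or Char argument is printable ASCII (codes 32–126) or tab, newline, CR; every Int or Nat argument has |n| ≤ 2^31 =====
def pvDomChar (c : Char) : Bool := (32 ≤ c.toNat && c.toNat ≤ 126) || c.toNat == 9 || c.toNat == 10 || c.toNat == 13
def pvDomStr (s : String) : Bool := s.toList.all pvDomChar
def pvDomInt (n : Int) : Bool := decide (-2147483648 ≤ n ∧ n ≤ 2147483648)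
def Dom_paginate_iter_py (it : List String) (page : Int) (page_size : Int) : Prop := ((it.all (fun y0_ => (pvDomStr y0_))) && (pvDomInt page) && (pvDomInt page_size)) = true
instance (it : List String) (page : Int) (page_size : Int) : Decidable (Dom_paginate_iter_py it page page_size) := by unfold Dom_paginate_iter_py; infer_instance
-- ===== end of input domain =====

-- B replaces A's conditional-append enumerate loop by materializing the list and
-- taking one clamped slice; objective: simpler.

-- ===== PORT A =====
def paginate_iter_py (it : List String) (page : Int) (page_size : Int) : List String × Int × Int × Bool × Bool :=
  let start := max 0 ((page - 1) * page_size)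
  let end_ := start + page_size
  -- for total, url in enumerate(it, start=1): if start < total <= end: rows.append(url)
  let st := it.foldl (fun (acc : List String × Int) url =>
    let total := acc.2 + 1
    (if start < total ∧ total ≤ end_ then acc.1 ++ [url] else acc.1, total)) ([], 0)
  let rows := st.1
  let total := st.2
  let total_pages := max 1 (PySem.Int.floordiv (total + page_size - 1) page_size)
  (rows, total, total_pages, decide (page > 1), decide (page < total_pages))

-- ===== PORT B =====
def paginate_iter_py_alt (it : List String) (page : Int) (page_size : Int) : List String × Int × Int × Bool × Bool :=
  let items := it
  let total : Int := items.length
  let start := max 0 ((page - 1) * page_size)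
  let rows := PySem.List.slice items (some start) (some (start + max 0 page_size))
  let total_pages := max 1 (PySem.Int.floordiv (total + page_size - 1) page_size)
  (rows, total, total_pages, decide (page > 1), decide (page < total_pages))

-- ===== PRECONDITION & SPEC =====
-- page_size = 0 makes both Pythons raise ZeroDivisionError in the total_pages division.
def Pre_paginate_iter_py (it : List String) (page : Int) (page_size : Int) : Prop := page_size ≠ 0
instance (it : List String) (page : Int) (page_size : Int) : Decidable (Pre_paginate_iter_py it page page_size) := by unfold Pre_paginate_iter_py; infer_instance
def pvWitness_paginate_iter_py : List String × Int × Int := (["a", "b", "c"], 2, 2)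

def Spec_paginate_iter_py (it : List String) (page : Int) (page_size : Int) (out : List String × Int × Int × Bool × Bool) : Prop := out = paginate_iter_py_alt it page page_size
instance (it : List String) (page : Int) (page_size : Int) (out : List String × Int × Int × Bool × Bool) : Decidable (Spec_paginate_iter_py it page page_size out) := by unfold Spec_paginate_iter_py; infer_instance

-- ===== CLAIM (what is proved, stated in full; the proofs are below) =====
def Claim_equal_paginate_iter_py : Prop := ∀ (it : List String) (page : Int) (page_size : Int), Dom_paginate_iter_py it page page_size → Pre_paginate_iter_py it page page_size → Spec_paginate_iter_py it page page_size (paginate_iter_py it page page_size)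

-- ===== LEMMAS AND PROOFS =====

/-- A's loop collects exactly the window of 0-based indices [s, e) (relative to the
running counter `t`), and its counter ends at `t + l.length`. -/
theorem foldA_eq (s e : Int) : ∀ (l r : List String) (t : Int), 0 ≤ t →
    l.foldl (fun (acc : List String × Int) url =>
      let total := acc.2 + 1
      (if s < total ∧ total ≤ e then acc.1 ++ [url] else acc.1, total)) (r, t)
    = (r ++ (l.drop (s - t).toNat).take ((e - max s t).toNat), t + l.length) := by
  intro l
  induction l with
  | nil => intro r t ht; simp
  | cons h l ih =>
    intro r t ht
    simp only [List.foldl_cons]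
    rw [ih _ (t + 1) (by omega)]
    by_cases hs : s < t + 1
    · have hd : (s - t).toNat = 0 := by omega
      have hd' : (s - (t + 1)).toNat = 0 := by omega
      have hm : max s t = t := by omega
      have hm' : max s (t + 1) = t + 1 := by omega
      by_cases he : t + 1 ≤ e
      · have hk : (e - t).toNat = (e - (t + 1)).toNat + 1 := by omega
        simp [hs, he, hd, hd', hm, hm', hk, List.length_cons]
        omega
      · have hk : (e - t).toNat = 0 := by omega
        have hk' : (e - (t + 1)).toNat = 0 := by omega
        simp [hs, he, hd, hd', hm, hm', hk, hk']
        omega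
    · have hd : (s - t).toNat = (s - (t + 1)).toNat + 1 := by omega
      have hm : max s t = s := by omega
      have hm' : max s (t + 1) = s := by omega
      simp [hs, hd, hm, hm']
      omega

theorem paginate_iter_py_spec : Claim_equal_paginate_iter_py := by
  intro it page page_size _ _
  unfold Spec_paginate_iter_py paginate_iter_py paginate_iter_py_alt
  simp only []
  set s := max 0 ((page - 1) * page_size) with hs
  have hs0 : 0 ≤ s := le_max_left _ _
  rw [foldA_eq (s := s) (e := s + page_size) it [] 0 le_rfl]
  have hmax : max s 0 = s := by omega
  have hslice : PySem.List.slice it (some s) (some (s + max 0 page_size))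
      = (it.drop s.toNat).take ((s + max 0 page_size).toNat - s.toNat) :=
    PySem.List.slice_toNat it hs0 (by omega)
  have htak : (s + max 0 page_size).toNat - s.toNat = (s + page_size - max s 0).toNat := by omega
  have hdrop : (s - 0).toNat = s.toNat := by omega
  simp only [hslice, htak, hdrop, zero_add, List.nil_append]
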